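-- pv_equiv track=rewrite | github.com/oooidw/MB_Sim | functions.py | get_RS
-- ===== SOURCE A (Python) =====
-- def traslate_state(state, L):
--     """
--     Translate the state to the right with periodic boundary conditions.
--
--     Args:
--         state (int): The input state.
--         L (int): The lenght of the system.
--
--     Returns:
--         int: The translated state.
--     """
--     return state >> 1 | (state & 1) << (L - 1)
--
-- def get_RS(n,L):
--     """
--     Find the rappresentative state and the the translation distance from it.
--
--     Args:
--         n (int): The input state.
--         L (int): The lenght of the system.
--
--     Returns:
--         list: The list of [rappresentative state, translation distance].
--     """
--
--     min_state = n
--     d = 0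
--     for l in range(1,L):
--         n = traslate_state(n, L)
--         if n < min_state:
--             min_state = n
--             d = l
--     return [min_state, d]
-- ===== SOURCE B (Python) =====
-- def traslate_state(state, L):
--     return state >> 1 | (state & 1) << (L - 1)
--
-- def get_RS(n, L):
--     # Build the full table of rotations, then reduce: min picks the
--     # representative, index its first occurrence = translation distance.
--     rotations = [n]
--     for l in range(1, L):
--         n = traslate_state(n, L)
--         rotations.append(n)
--     m = min(rotations)
--     d = rotations.index(m)
--     return [m, d]
-- ===== Notes on version B (the rewrite author's own statement) =====
-- stated objective: simpler
-- what changed: Replaces the incremental min/argmin tracking inside the rotation loop with a build-then-reduce decomposition: collect the list of all L rotations, then take min() and its first index.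
import Mathlib
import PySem

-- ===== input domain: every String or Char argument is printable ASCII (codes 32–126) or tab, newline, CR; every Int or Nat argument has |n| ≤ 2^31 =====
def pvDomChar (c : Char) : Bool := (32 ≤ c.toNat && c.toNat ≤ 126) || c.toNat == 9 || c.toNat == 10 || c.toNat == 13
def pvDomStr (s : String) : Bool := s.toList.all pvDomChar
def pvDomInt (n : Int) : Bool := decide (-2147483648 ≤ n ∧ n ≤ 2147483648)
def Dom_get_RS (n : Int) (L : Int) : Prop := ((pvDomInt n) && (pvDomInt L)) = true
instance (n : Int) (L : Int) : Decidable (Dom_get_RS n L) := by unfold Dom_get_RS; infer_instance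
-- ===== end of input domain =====

-- B builds the whole rotation table and reduces with min + first index, instead of A's
-- incremental min/argmin tracking; objective: simpler decomposition, same cost.

-- ===== PORT A =====
-- shared module helper (used by both Pythons). `(L-1).toNat` is exact because both
-- callers only invoke it for l ∈ range(1, L), hence L ≥ 2; Python's >> << & | on ints
-- are Lean's >>> <<< / PySem.Int.band / PySem.Int.bor.
def traslate_state (state : Int) (L : Int) : Int :=
  PySem.Int.bor (state >>> (1 : Nat)) ((PySem.Int.band state 1) <<< (L - 1).toNat)

def get_RS (n : Int) (L : Int) : List Int :=
  let r := (PySem.List.pyRange 1 L 1).foldl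
    (fun (st : Int × Int × Int) l =>
      let n' := traslate_state st.1 L
      if n' < st.2.1 then (n', n', l) else (n', st.2.1, st.2.2))
    (n, n, 0)
  [r.2.1, r.2.2]

-- ===== PORT B =====
def get_RS_alt (n : Int) (L : Int) : List Int :=
  let p := (PySem.List.pyRange 1 L 1).foldl
    (fun (st : Int × List Int) _ =>
      let n' := traslate_state st.1 L
      (n', st.2 ++ [n']))
    (n, [n])
  match PySem.List.min? p.2 (fun x => x) with
  | none => []      -- unreachable: the rotation list always contains n
  | some m =>
    match PySem.List.index? p.2 m with
    | none => []    -- unreachable: m ∈ p.2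
    | some d => [m, (d : Int)]

-- ===== PRECONDITION & SPEC =====
def Spec_get_RS (n : Int) (L : Int) (out : List Int) : Prop := out = get_RS_alt n L
instance (n : Int) (L : Int) (out : List Int) : Decidable (Spec_get_RS n L out) := by unfold Spec_get_RS; infer_instance

-- ===== CLAIM (what is proved, stated in full; the proofs are below) =====
def Claim_equal_get_RS : Prop := ∀ (n : Int) (L : Int), Dom_get_RS n L → Spec_get_RS n L (get_RS n L)

-- ===== LEMMAS AND PROOFS =====

-- Proof-side names for the two folds (bodies syntactically identical to the ports').
def foldA (L n : Int) (r : List Int) : Int × Int × Int :=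
  r.foldl
    (fun (st : Int × Int × Int) l =>
      let n' := traslate_state st.1 L
      if n' < st.2.1 then (n', n', l) else (n', st.2.1, st.2.2))
    (n, n, 0)

def foldB (L n : Int) (r : List Int) : Int × List Int :=
  r.foldl
    (fun (st : Int × List Int) _ =>
      let n' := traslate_state st.1 L
      (n', st.2 ++ [n']))
    (n, [n])

theorem get_RS_as_foldA (n L : Int) :
    get_RS n L = [(foldA L n (PySem.List.pyRange 1 L 1)).2.1,
                  (foldA L n (PySem.List.pyRange 1 L 1)).2.2] := rfl

theorem get_RS_alt_as_foldB (n L : Int) :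
    get_RS_alt n L =
      (match PySem.List.min? (foldB L n (PySem.List.pyRange 1 L 1)).2 (fun x => x) with
       | none => []
       | some m =>
         match PySem.List.index? (foldB L n (PySem.List.pyRange 1 L 1)).2 m with
         | none => []
         | some d => [m, (d : Int)]) := rfl

theorem foldA_append (L n x : Int) (r : List Int) :
    foldA L n (r ++ [x]) =
      (let st := foldA L n r
       let n' := traslate_state st.1 L
       if n' < st.2.1 then (n', n', x) else (n', st.2.1, st.2.2)) := by
  simp [foldA, List.foldl_append]

theorem foldB_append (L n x : Int) (r : List Int) :
    foldB L n (r ++ [x]) =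
      (let st := foldB L n r
       (traslate_state st.1 L, st.2 ++ [traslate_state st.1 L])) := by
  simp [foldB, List.foldl_append]

-- Invariant: after folding over range(1, 1+k) the current states agree, B's list has
-- k+1 entries, its first minimum is A's running min and its first index A's distance.
theorem fold_invariant (L n : Int) (k : Nat) :
    (foldA L n (PySem.List.pyRange 1 (1 + (k : Int)) 1)).1
      = (foldB L n (PySem.List.pyRange 1 (1 + (k : Int)) 1)).1 ∧
    (foldB L n (PySem.List.pyRange 1 (1 + (k : Int)) 1)).2.length = k + 1 ∧
    PySem.List.min? (foldB L n (PySem.List.pyRange 1 (1 + (k : Int)) 1)).2 (fun x => x)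
      = some (foldA L n (PySem.List.pyRange 1 (1 + (k : Int)) 1)).2.1 ∧
    PySem.List.index? (foldB L n (PySem.List.pyRange 1 (1 + (k : Int)) 1)).2
        (foldA L n (PySem.List.pyRange 1 (1 + (k : Int)) 1)).2.1
      = some (foldA L n (PySem.List.pyRange 1 (1 + (k : Int)) 1)).2.2.toNat ∧
    (foldA L n (PySem.List.pyRange 1 (1 + (k : Int)) 1)).2.2
      = ((foldA L n (PySem.List.pyRange 1 (1 + (k : Int)) 1)).2.2.toNat : Int) := by
  induction k with
  | zero =>
      rw [show (1 + ((0:Nat):Int)) = 1 by norm_num, PySem.List.pyRange_one_eq_nil le_rfl]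
      refine ⟨rfl, rfl, ?_, ?_, rfl⟩
      · simp [foldA, foldB, PySem.List.min?_id_cons]
      · simp [foldA, foldB]
  | succ k ih =>
      rw [show (1 + ((k+1:Nat):Int)) = (1 + (k:Int)) + 1 by push_cast; ring,
          PySem.List.pyRange_one_succ_right (by omega : (1:Int) ≤ 1 + (k:Int))] at *
      obtain ⟨h1, h2, h3, h4, h5⟩ := ih
      rw [foldA_append, foldB_append]
      set a := foldA L n (PySem.List.pyRange 1 (1 + (k:Int)) 1) with ha
      set b := foldB L n (PySem.List.pyRange 1 (1 + (k:Int)) 1) with hb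
      simp only [← h1]
      set n' := traslate_state a.1 L with hn'
      obtain ⟨hd, tl, hbt⟩ := List.exists_cons_of_ne_nil
        (by intro h; rw [h] at h2; simp at h2 : b.2 ≠ [])
      have hmin : tl.foldl min hd = a.2.1 := by
        have := h3; rw [hbt, PySem.List.min?_id_cons] at this
        exact Option.some_injective _ this
      by_cases h : n' < a.2.1
      · have hnot : n' ∉ b.2 := fun hmem => absurd (PySem.List.min?_isMin h3 n' hmem) (by simpa using h)
        rw [if_pos h]
        refine ⟨rfl, by simp [h2], ?_, ?_, by simp; omega⟩
        · rw [hbt, List.cons_append, PySem.List.min?_id_cons, List.foldl_append, hmin]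
          simp [min_eq_right h.le]
        · rw [PySem.List.index?_append_singleton_self b.2 n' hnot, h2]
          show some (k+1) = some ((1+(k:Int)).toNat)
          congr 1
          omega
      · rw [if_neg h]
        refine ⟨rfl, by simp [h2], ?_, ?_, h5⟩
        · rw [hbt, List.cons_append, PySem.List.min?_id_cons, List.foldl_append, hmin]
          simp [min_eq_left (not_lt.mp h)]
        · rw [PySem.List.index?_append_of_mem _ (PySem.List.min?_mem h3)]
          exact h4

theorem get_RS_eq_alt (n L : Int) : get_RS n L = get_RS_alt n L := by
  rw [get_RS_as_foldA, get_RS_alt_as_foldB]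
  have hL : 1 + (((L - 1).toNat : Nat) : Int) = L ∨ PySem.List.pyRange 1 L 1 = [] := by
    by_cases h : 1 ≤ L
    · left; omega
    · right; exact PySem.List.pyRange_one_eq_nil (by omega)
  rcases hL with hL | hL
  · obtain ⟨h1, h2, h3, h4, h5⟩ := fold_invariant L n (L - 1).toNat
    rw [hL] at h1 h2 h3 h4 h5
    simp only [h3, h4]
    rw [← h5]
  · rw [hL]
    simp [foldA, foldB, PySem.List.min?_id_cons]

-- ===== VERDICT (by name: the statement is the Claim_ definition above) =====
theorem get_RS_spec : Claim_equal_get_RS := by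
  intro n L _
  exact get_RS_eq_alt n L
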